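-- pv_equiv track=rewrite | github.com/SciTools/iris | lib/iris/_merge.py | _separable
-- ===== SOURCE A (Python) =====
-- from collections import OrderedDict, namedtuple
--
-- class _Relation(namedtuple("Relation", ["separable", "inseparable"])):
--     """
--     Categorisation of the candidate dimensions belonging to a
--     :class:`ProtoCube` into separable 'independent' dimensions, and
--     inseparable dependent dimensions.
--
--     Args:
--
--     * separable:
--         A set of independent candidate dimension names.
--
--     * inseperable:
--         A set of dependent candidate dimension names.
--
--     """
--
--     __slots__ = ()
--
-- def _separable_pair(name, index):
--     """
--     Determine whether the candidate dimension is separable.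
--
--     A candidate dimension X and Y are separable if each scalar
--     value of X maps to the same set of scalar values of Y.
--
--     Args:
--
--     * name1:
--         The first candidate dimension to be compared.
--
--     * name2:
--         The second candidate dimension to be compared.
--
--     * index:
--         The cross-reference dictionary for the first candidate
--         dimension.
--
--     Returns:
--         Boolean.
--
--     """
--     items = iter(index.values())
--     reference = next(items)[name]
--
--     return all([item[name] == reference for item in items])
--
-- def _separable(name, indexes):
--     """
--     Determine the candidate dimensions that are separable and
--     inseparable relative to the provided candidate dimension.
--
--     A candidate dimension X and Y are separable if each scalar
--     value of X maps to the same set of scalar values of Y.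
--
--     Args:
--
--     * name:
--         The candidate dimension that requires its separable and
--         inseparable relationship to be determined.
--
--     * indexes:
--         The cross-reference dictionary for each candidate dimension.
--
--     Returns:
--         A tuple containing the set of separable and inseparable
--         candidate dimensions.
--
--     """
--     separable = set()
--     inseparable = set()
--
--     for target_name in indexes:
--         if name != target_name:
--             if _separable_pair(target_name, indexes[name]):
--                 separable.add(target_name)
--             else:
--                 inseparable.add(target_name)
--
--     return _Relation(separable, inseparable)
-- ===== SOURCE B (Python) =====
-- from collections import namedtuple
--
-- class _Relation(namedtuple("Relation", ["separable", "inseparable"])):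
--     __slots__ = ()
--
-- def _separable(name, indexes):
--     targets = [t for t in indexes if t != name]
--     if not targets:
--         return _Relation(set(), set())
--     items = iter(indexes[name].values())
--     reference = next(items)
--     differs = set()
--     for item in items:
--         for t in targets:
--             if item[t] != reference[t]:
--                 differs.add(t)
--     return _Relation({t for t in targets if t not in differs},
--                      {t for t in targets if t in differs})
-- ===== Notes on version B (the rewrite author's own statement) =====
-- stated objective: alternative
-- what changed: B makes a single pass over the rows of indexes[name], collecting the set of target names whose value differs from the first row, then filters the target names once, instead of A's per-target full rescan of all rows via _separable_pair.
import Mathlib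
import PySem

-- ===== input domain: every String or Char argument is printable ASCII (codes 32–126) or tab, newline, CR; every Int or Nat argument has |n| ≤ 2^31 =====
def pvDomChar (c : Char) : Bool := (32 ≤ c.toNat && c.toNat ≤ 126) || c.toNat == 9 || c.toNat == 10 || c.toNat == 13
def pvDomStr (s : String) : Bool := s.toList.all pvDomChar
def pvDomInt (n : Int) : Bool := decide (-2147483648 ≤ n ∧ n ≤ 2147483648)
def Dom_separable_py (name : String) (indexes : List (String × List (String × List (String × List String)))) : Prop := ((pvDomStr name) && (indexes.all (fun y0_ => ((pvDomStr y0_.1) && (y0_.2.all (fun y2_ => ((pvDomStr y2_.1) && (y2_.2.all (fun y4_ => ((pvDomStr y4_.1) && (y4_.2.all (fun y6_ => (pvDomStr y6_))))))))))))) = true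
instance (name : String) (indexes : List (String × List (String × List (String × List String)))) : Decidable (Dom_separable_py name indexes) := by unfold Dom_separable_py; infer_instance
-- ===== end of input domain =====

-- B replaces A's per-target rescan of all index rows (_separable_pair) by ONE pass over the
-- rows that collects the set of target names whose value differs from the first row, then a
-- single filter of the target names; equivalence of the RETURN value is proved on Pre_.

-- Shared representation step: the Python dict arguments (dict of dict of dict) as PySem.Dicts
def pvConvIdx (x : List (String × List (String × List String))) : PySem.Dict String (PySem.Dict String (List String)) :=
  PySem.Dict.ofList (x.map (fun q => (q.1, PySem.Dict.ofList q.2)))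

def pvConv (indexes : List (String × List (String × List (String × List String)))) : PySem.Dict String (PySem.Dict String (PySem.Dict String (List String))) :=
  PySem.Dict.ofList (indexes.map (fun p => (p.1, pvConvIdx p.2)))

-- ===== PORT A =====
-- _separable_pair; the headD/getD defaults are unreachable under Pre_ (next() / item[name] raise there)
def separable_pair_py (name : String) (index : PySem.Dict String (PySem.Dict String (List String))) : Bool :=
  let items := index.values
  let reference := (items.headD PySem.Dict.empty).getD name []
  items.tail.all (fun item => item.getD name [] == reference)

def separable_py (name : String) (indexes : List (String × List (String × List (String × List String)))) : List String × List String :=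
  let indexesD := pvConv indexes
  indexesD.keys.foldl (fun (acc : PySem.Set String × PySem.Set String) target_name =>
    if name ≠ target_name then
      if separable_pair_py target_name (indexesD.getD name PySem.Dict.empty) then
        (PySem.Set.add acc.1 target_name, acc.2)
      else
        (acc.1, PySem.Set.add acc.2 target_name)
    else acc) (PySem.Set.empty, PySem.Set.empty)

-- ===== PORT B =====
-- targets are dict keys, hence distinct: the two set comprehensions over them are filters
def separable_py_alt (name : String) (indexes : List (String × List (String × List (String × List String)))) : List String × List String :=
  let indexesD := pvConv indexes
  let targets := indexesD.keys.filter (fun t => t != name)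
  if targets.isEmpty then ([], []) else
    match (indexesD.getD name PySem.Dict.empty).values with
    | [] => ([], [])   -- Python B raises StopIteration here (outside Pre_)
    | reference :: rest =>
      let differs : PySem.Set String := rest.foldl (fun acc item =>
        targets.foldl (fun acc t =>
          if item.getD t [] ≠ reference.getD t [] then PySem.Set.add acc t else acc) acc)
        PySem.Set.empty
      (targets.filter (fun t => !(PySem.Set.contains differs t)),
       targets.filter (fun t => PySem.Set.contains differs t))

-- ===== PRECONDITION & SPEC =====
-- Pre_ excludes exactly the inputs on which the Python A raises: a target name other than `name`
-- exists while `name` is not a key of indexes (KeyError), indexes[name] is empty (StopIteration),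
-- or some row of indexes[name] lacks some target key (KeyError).
def Pre_separable_py (name : String) (indexes : List (String × List (String × List (String × List String)))) : Prop :=
  ((pvConv indexes).keys.all (fun t => t == name) ||
   ((pvConv indexes).contains name &&
    !((pvConv indexes).getD name PySem.Dict.empty).values.isEmpty &&
    ((pvConv indexes).getD name PySem.Dict.empty).values.all (fun row =>
      (pvConv indexes).keys.all (fun t => (t == name) || row.contains t)))) = true
instance (name : String) (indexes : List (String × List (String × List (String × List String)))) : Decidable (Pre_separable_py name indexes) := by unfold Pre_separable_py; infer_instance

def pvWitness_separable_py : String × (List (String × List (String × List (String × List String)))) :=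
  ("a", [("a", [("k", [("b", ["v"])])]), ("b", [])])

def Spec_separable_py (name : String) (indexes : List (String × List (String × List (String × List String)))) (out : List String × List String) : Prop := out = separable_py_alt name indexes
instance (name : String) (indexes : List (String × List (String × List (String × List String)))) (out : List String × List String) : Decidable (Spec_separable_py name indexes out) := by unfold Spec_separable_py; infer_instance

-- ===== CLAIM (what is proved, stated in full; the proofs are below) =====
def Claim_equal_separable_py : Prop := ∀ (name : String) (indexes : List (String × List (String × List (String × List String)))), Dom_separable_py name indexes → Pre_separable_py name indexes → Spec_separable_py name indexes (separable_py name indexes)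

-- ===== LEMMAS AND PROOFS =====

lemma pvLoopA (name : String) (pair : String → Bool) :
    ∀ (K : List String) (s i : List String), K.Nodup →
      (∀ t ∈ K, t ∉ s) → (∀ t ∈ K, t ∉ i) →
      K.foldl (fun (acc : PySem.Set String × PySem.Set String) target_name =>
        if name ≠ target_name then
          if pair target_name then (PySem.Set.add acc.1 target_name, acc.2)
          else (acc.1, PySem.Set.add acc.2 target_name)
        else acc) (s, i)
      = (s ++ K.filter (fun t => decide (name ≠ t) && pair t),
         i ++ K.filter (fun t => decide (name ≠ t) && !pair t)) := by
  intro K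
  induction K with
  | nil => simp
  | cons h t ih =>
    intro s i hnd hs hi
    have hht : h ∉ t := (List.nodup_cons.mp hnd).1
    have hndt : t.Nodup := (List.nodup_cons.mp hnd).2
    simp only [List.foldl_cons, List.filter_cons]
    by_cases hne : name ≠ h
    · rw [if_pos hne]
      by_cases hp : pair h = true
      · rw [if_pos hp]
        have hadd : PySem.Set.add s h = s ++ [h] :=
          PySem.Set.add_of_not_mem (hs h (List.mem_cons_self))
        simp only [hadd]
        rw [ih (s ++ [h]) i hndt
          (fun u hu => by
            simp only [List.mem_append, List.mem_singleton]
            rintro (h1 | rfl)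
            · exact hs u (List.mem_cons_of_mem _ hu) h1
            · exact hht hu)
          (fun u hu => hi u (List.mem_cons_of_mem _ hu))]
        simp [hne, hp, List.append_assoc]
      · rw [if_neg hp]
        have hadd : PySem.Set.add i h = i ++ [h] :=
          PySem.Set.add_of_not_mem (hi h (List.mem_cons_self))
        simp only [hadd]
        rw [ih s (i ++ [h]) hndt
          (fun u hu => hs u (List.mem_cons_of_mem _ hu))
          (fun u hu => by
            simp only [List.mem_append, List.mem_singleton]
            rintro (h1 | rfl)
            · exact hi u (List.mem_cons_of_mem _ hu) h1
            · exact hht hu)]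
        simp [hne, hp, List.append_assoc]
    · rw [if_neg hne]
      rw [ih s i hndt
        (fun u hu => hs u (List.mem_cons_of_mem _ hu))
        (fun u hu => hi u (List.mem_cons_of_mem _ hu))]
      simp [hne]

lemma pvMemFoldAddIf (P : String → Bool) :
    ∀ (L : List String) (acc : List String) (y : String),
      (y ∈ L.foldl (fun acc t => if P t then PySem.Set.add acc t else acc) acc) ↔
        (y ∈ acc ∨ (y ∈ L ∧ P y = true)) := by
  intro L
  induction L with
  | nil => simp
  | cons h t ih =>
    intro acc y
    simp only [List.foldl_cons, List.mem_cons]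
    by_cases hp : P h = true
    · rw [if_pos hp, ih]
      simp only [PySem.Set.mem_add]
      constructor
      · rintro ((h1 | h1) | h1)
        · exact Or.inl h1
        · subst h1; exact Or.inr ⟨Or.inl rfl, hp⟩
        · exact Or.inr ⟨Or.inr h1.1, h1.2⟩
      · rintro (h1 | ⟨(h1 | h1), h2⟩)
        · exact Or.inl (Or.inl h1)
        · subst h1; exact Or.inl (Or.inr rfl)
        · exact Or.inr ⟨h1, h2⟩
    · rw [if_neg hp, ih]
      constructor
      · rintro (h1 | h1)
        · exact Or.inl h1
        · exact Or.inr ⟨Or.inr h1.1, h1.2⟩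
      · rintro (h1 | ⟨(h1 | h1), h2⟩)
        · exact Or.inl h1
        · subst h1; exact absurd h2 hp
        · exact Or.inr ⟨h1, h2⟩

lemma pvMemDiffers (targets : List String) (reference : PySem.Dict String (List String)) :
    ∀ (rest : List (PySem.Dict String (List String))) (acc : List String) (y : String),
      (y ∈ rest.foldl (fun acc item =>
          targets.foldl (fun acc t =>
            if item.getD t [] ≠ reference.getD t [] then PySem.Set.add acc t else acc) acc) acc) ↔
        (y ∈ acc ∨ (y ∈ targets ∧ ∃ item ∈ rest, item.getD y [] ≠ reference.getD y [])) := by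
  intro rest
  induction rest with
  | nil => simp
  | cons h t ih =>
    intro acc y
    simp only [List.foldl_cons, List.mem_cons]
    rw [ih]
    have := pvMemFoldAddIf (fun s => decide (h.getD s [] ≠ reference.getD s [])) targets acc y
    simp only [decide_eq_true_eq] at this
    rw [this]
    constructor
    · rintro ((h1 | ⟨h1, h2⟩) | ⟨h1, it, hit, h2⟩)
      · exact Or.inl h1
      · exact Or.inr ⟨h1, h, Or.inl rfl, h2⟩
      · exact Or.inr ⟨h1, it, Or.inr hit, h2⟩
    · rintro (h1 | ⟨h1, it, (hit | hit), h2⟩)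
      · exact Or.inl (Or.inl h1)
      · subst hit; exact Or.inl (Or.inr ⟨h1, h2⟩)
      · exact Or.inr ⟨h1, it, hit, h2⟩

lemma pvBneComm (a b : String) : decide (a ≠ b) = (b != a) := by
  rw [Bool.eq_iff_iff]
  simp only [decide_eq_true_eq, bne_iff_ne]
  exact ne_comm

-- ===== VERDICT (by name: the statement is the Claim_ definition above) =====
theorem separable_py_spec : Claim_equal_separable_py := by
  intro name indexes _hdom hpre
  simp only [Spec_separable_py, separable_py, separable_py_alt]
  set d := pvConv indexes with hd
  have hK : d.keys.Nodup := PySem.Dict.nodup_keys_ofList _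
  rw [pvLoopA name (fun t => separable_pair_py t (d.getD name PySem.Dict.empty)) d.keys
    PySem.Set.empty PySem.Set.empty hK (by simp [PySem.Set.empty]) (by simp [PySem.Set.empty])]
  simp only [PySem.Set.empty, List.nil_append]
  by_cases hT : (d.keys.filter (fun t => t != name)).isEmpty = true
  · -- no target other than name: both sides are ([], [])
    have hall : ∀ t ∈ d.keys, t = name := by
      intro t ht
      have h2 := List.filter_eq_nil_iff.mp (List.isEmpty_iff.mp hT) t ht
      simpa [bne_iff_ne] using h2
    rw [if_pos hT]
    refine Prod.ext ?_ ?_ <;>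
      · simp only [List.filter_eq_nil_iff]
        intro t ht
        simp [hall t ht]
  · rw [if_neg hT]
    -- from Pre_: indexes[name] has at least one row
    have hpre' := hpre
    unfold Pre_separable_py at hpre'
    rw [← hd] at hpre'
    have hnotall : d.keys.all (fun t => t == name) = false := by
      rcases List.isEmpty_eq_false_iff_exists_mem.mp (Bool.not_eq_true _ ▸ hT) with ⟨t, ht⟩
      rcases List.mem_filter.mp ht with ⟨htK, htne⟩
      refine Bool.eq_false_iff.mpr fun hallb => ?_
      have := List.all_eq_true.mp hallb t htK
      simp only [beq_iff_eq] at this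
      exact (bne_iff_ne.mp htne) this
    rw [hnotall, Bool.false_or] at hpre'
    have hrowsne : ((d.getD name PySem.Dict.empty).values).isEmpty = false := by
      simp only [Bool.and_eq_true] at hpre'
      simpa using hpre'.1.2
    obtain ⟨reference, rest, hrows⟩ :
        ∃ r rs, (d.getD name PySem.Dict.empty).values = r :: rs := by
      cases hv : (d.getD name PySem.Dict.empty).values with
      | nil => rw [hv] at hrowsne; simp at hrowsne
      | cons r rs => exact ⟨r, rs, rfl⟩
    rw [hrows]
    dsimp only
    -- characterise membership in B's differs set for a target t
    have hdiff : ∀ t ∈ d.keys.filter (fun t => t != name),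
        ((rest.foldl (fun acc item =>
            (d.keys.filter (fun t => t != name)).foldl (fun acc t =>
              if item.getD t [] ≠ reference.getD t [] then PySem.Set.add acc t else acc) acc)
          ([] : PySem.Set String)).contains t = true)
        ↔ ∃ item ∈ rest, item.getD t [] ≠ reference.getD t [] := by
      intro t ht
      rw [PySem.Set.contains_iff,
        pvMemDiffers (d.keys.filter (fun t => t != name)) reference rest ([] : PySem.Set String) t]
      simp only [List.not_mem_nil, false_or]
      exact and_iff_right ht
    refine Prod.ext ?_ ?_ <;>
    · simp only [List.filter_filter]
      refine List.filter_congr ?_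
      intro t htK
      simp only [separable_pair_py, hrows, List.headD_cons, List.tail_cons, pvBneComm]
      by_cases hne : (t != name) = true
      · have htT : t ∈ d.keys.filter (fun t => t != name) := List.mem_filter.mpr ⟨htK, hne⟩
        rw [hne, Bool.true_and, Bool.and_true]
        by_cases hc : ((rest.foldl (fun acc item =>
            (d.keys.filter (fun t => t != name)).foldl (fun acc t =>
              if item.getD t [] ≠ reference.getD t [] then PySem.Set.add acc t else acc) acc)
          ([] : PySem.Set String)).contains t) = true
        · obtain ⟨item, hmem, hne2⟩ := (hdiff t htT).mp hc
          have hall2 : rest.all (fun item => item.getD t [] == reference.getD t []) = false :=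
            List.all_eq_false.mpr ⟨item, hmem, by simpa using hne2⟩
          rw [hall2, hc]; rfl
        · rw [Bool.not_eq_true] at hc
          have hall2 : rest.all (fun item => item.getD t [] == reference.getD t []) = true := by
            rw [List.all_eq_true]
            intro item hmem
            by_contra hne2
            have := (hdiff t htT).mpr ⟨item, hmem, by simpa using hne2⟩
            rw [hc] at this
            exact Bool.false_ne_true this
          rw [hall2, hc]; rfl
      · rw [Bool.not_eq_true] at hne
        simp [hne]
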